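-- pv_equiv track=rewrite | github.com/mortyc126-debug/rayon | src/kw_game.py | compute_kw_matrix
-- ===== SOURCE A (Python) =====
-- def evaluate_mono3sat(assignment, clauses):
--     for clause in clauses:
--         if not any(assignment[v] for v in clause):
--             return False
--     return True
--
-- def compute_kw_matrix(n, clauses):
--     """Compute the KW relation matrix.
--
--     Returns:
--       ones: list of solutions (f(x)=1)
--       zeros: list of non-solutions (f(x)=0)
--       kw[x_idx][y_idx]: set of indices i where x_i ≠ y_i
--     """
--     ones = []
--     zeros = []
--
--     for bits in range(2**n):
--         assignment = tuple((bits >> i) & 1 for i in range(n))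
--         if evaluate_mono3sat(assignment, clauses):
--             ones.append(assignment)
--         else:
--             zeros.append(assignment)
--
--     # KW matrix: for each (x, y), the valid outputs
--     # For monotone, valid = {i : x_i=1, y_i=0}
--     # For general, valid = {i : x_i ≠ y_i}
--
--     kw_mono = {}  # Monotone KW
--     kw_gen = {}   # General KW
--
--     for xi, x in enumerate(ones):
--         kw_mono[xi] = {}
--         kw_gen[xi] = {}
--         for yi, y in enumerate(zeros):
--             mono_diff = frozenset(i for i in range(n) if x[i] == 1 and y[i] == 0)
--             gen_diff = frozenset(i for i in range(n) if x[i] != y[i])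
--             kw_mono[xi][yi] = mono_diff
--             kw_gen[xi][yi] = gen_diff
--
--     return ones, zeros, kw_mono, kw_gen
-- ===== SOURCE B (Python) =====
-- def compute_kw_matrix(n, clauses):
--     # Build the assignment list recursively (cartesian growth, low bit first),
--     # partition it by two staged filter passes, and read each KW diff-set off
--     # precomputed sorted support lists instead of scanning range(n) per pair.
--     assignments = [()]
--     for _ in range(n):
--         assignments = [t + (0,) for t in assignments] + [t + (1,) for t in assignments]
--
--     def sat(a):
--         return all(any(a[v] for v in c) for c in clauses)
--
--     ones = [a for a in assignments if sat(a)]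
--     zeros = [a for a in assignments if not sat(a)]
--
--     def support(a):
--         return [i for i, b in enumerate(a) if b]
--
--     def merge_xor(p, q):
--         # symmetric difference of two strictly increasing lists, kept sorted
--         out = []
--         i = j = 0
--         while i < len(p) and j < len(q):
--             if p[i] < q[j]:
--                 out.append(p[i]); i += 1
--             elif q[j] < p[i]:
--                 out.append(q[j]); j += 1
--             else:
--                 i += 1; j += 1
--         out.extend(p[i:])
--         out.extend(q[j:])
--         return out
--
--     one_sup = [support(a) for a in ones]
--     zero_sup = [support(a) for a in zeros]
--
--     kw_mono = {xi: {yi: frozenset(i for i in sx if i not in sy)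
--                     for yi, sy in enumerate(zero_sup)}
--                for xi, sx in enumerate(one_sup)}
--     kw_gen = {xi: {yi: frozenset(merge_xor(sx, sy))
--                    for yi, sy in enumerate(zero_sup)}
--               for xi, sx in enumerate(one_sup)}
--     return ones, zeros, kw_mono, kw_gen
-- ===== Notes on version B (the rewrite author's own statement) =====
-- stated objective: alternative
-- what changed: B builds the assignment list by recursive cartesian growth (no integer bit extraction), partitions it by two staged filter passes instead of A's single append loop, precomputes each assignment's sorted support (index list of its ones), and obtains every KW diff-set from set algebra on those supports (a filtered difference and a sorted two-pointer merge for the symmetric difference) instead of A's per-pair range(n) scans with tuple lookups.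
-- outside the precondition, e.g. on compute_kw_matrix(1, [[], [5]]): A returns ([], [(0,), (1,)], {}, {}), B returns ([], [(0,), (1,)], {}, {})
import Mathlib
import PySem

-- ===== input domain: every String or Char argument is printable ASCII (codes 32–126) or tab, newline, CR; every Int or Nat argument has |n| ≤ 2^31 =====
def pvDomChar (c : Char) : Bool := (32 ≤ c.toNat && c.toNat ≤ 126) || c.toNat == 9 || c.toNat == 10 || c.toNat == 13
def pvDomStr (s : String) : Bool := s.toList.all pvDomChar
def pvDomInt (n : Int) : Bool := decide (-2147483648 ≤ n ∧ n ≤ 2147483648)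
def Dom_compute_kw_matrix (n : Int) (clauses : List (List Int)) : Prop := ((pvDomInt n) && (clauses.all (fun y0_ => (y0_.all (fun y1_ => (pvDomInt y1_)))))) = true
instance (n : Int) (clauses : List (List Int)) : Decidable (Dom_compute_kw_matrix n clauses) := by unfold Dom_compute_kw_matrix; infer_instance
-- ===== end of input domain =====

-- B builds the assignments by recursive cartesian growth, partitions them by two staged filter
-- passes, and reads each KW diff-set off precomputed sorted support index lists (filtered
-- difference / sorted two-pointer merge) instead of A's per-pair range(n) scans; objective: alternative.

-- ===== PORT A =====

-- tuple((bits >> i) & 1 for i in range(n))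
def pvAsg (n bits : Int) : List Int :=
  (PySem.List.pyRange 0 n 1).map (fun i => PySem.Int.band (bits >>> i) 1)

-- any(assignment[v] for v in clause); under Pre_ every index v is in range, so xs[v] is pyGetD
def pvAnyA (a : List Int) : List Int → Bool
  | [] => false
  | v :: vs => if PySem.List.pyGetD a v 0 ≠ 0 then true else pvAnyA a vs

def evaluate_mono3sat (a : List Int) : List (List Int) → Bool
  | [] => true
  | c :: cs => if ¬ pvAnyA a c then false else evaluate_mono3sat a cs

-- frozenset(i for i in range(n) if x[i] == 1 and y[i] == 0)
def pvMono (n : Int) (x y : List Int) : List Int :=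
  PySem.Set.ofList ((PySem.List.pyRange 0 n 1).filter
    (fun i => PySem.List.pyGetD x i 0 == 1 && PySem.List.pyGetD y i 0 == 0))

-- frozenset(i for i in range(n) if x[i] != y[i])
def pvGen (n : Int) (x y : List Int) : List Int :=
  PySem.Set.ofList ((PySem.List.pyRange 0 n 1).filter
    (fun i => PySem.List.pyGetD x i 0 != PySem.List.pyGetD y i 0))

def pvStepA (n : Int) (clauses : List (List Int))
    (acc : List (List Int) × List (List Int)) (bits : Int) :
    List (List Int) × List (List Int) :=
  let a := pvAsg n bits
  if evaluate_mono3sat a clauses then (acc.1 ++ [a], acc.2) else (acc.1, acc.2 ++ [a])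

def pvRowStepA (n : Int) (x : List Int)
    (row : PySem.Dict Int (List Int) × PySem.Dict Int (List Int)) (yp : Int × List Int) :
    PySem.Dict Int (List Int) × PySem.Dict Int (List Int) :=
  (row.1.insert yp.1 (pvMono n x yp.2), row.2.insert yp.1 (pvGen n x yp.2))

def pvOuterStepA (n : Int) (zeros : List (List Int))
    (kw : PySem.Dict Int (List (Int × List Int)) × PySem.Dict Int (List (Int × List Int)))
    (xp : Int × List Int) :
    PySem.Dict Int (List (Int × List Int)) × PySem.Dict Int (List (Int × List Int)) :=
  let row := (PySem.List.enumerate zeros 0).foldl (pvRowStepA n xp.2)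
    (PySem.Dict.empty, PySem.Dict.empty)
  (kw.1.insert xp.1 row.1.items, kw.2.insert xp.1 row.2.items)

def compute_kw_matrix (n : Int) (clauses : List (List Int)) :
    List (List Int) × List (List Int) × (List (Int × List (Int × List Int))) × (List (Int × List (Int × List Int))) :=
  -- range(2**n): 2**n = 2 ^ n.toNat for the n ≥ 0 admitted by Pre_ (Python raises on n < 0)
  let oz := (PySem.List.pyRange 0 ((2:Int) ^ n.toNat) 1).foldl (pvStepA n clauses) ([], [])
  let kw := (PySem.List.enumerate oz.1 0).foldl (pvOuterStepA n oz.2)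
    (PySem.Dict.empty, PySem.Dict.empty)
  (oz.1, oz.2, kw.1.items, kw.2.items)

-- ===== PORT B =====

-- assignments = [t+(0,) for t in assignments] + [t+(1,) for t in assignments]
def pvGrow (acc : List (List Int)) : List (List Int) :=
  acc.map (fun t => t ++ [0]) ++ acc.map (fun t => t ++ [1])

-- assignments = [()]; for _ in range(n): assignments = ...
def pvAssignments (n : Int) : List (List Int) :=
  (PySem.List.pyRange 0 n 1).foldl (fun acc _ => pvGrow acc) [[]]

-- all(any(a[v] for v in c) for c in clauses); under Pre_ every index v is in range
def pvSatB (clauses : List (List Int)) (a : List Int) : Bool :=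
  clauses.all (fun c => c.any (fun v => PySem.List.pyGetD a v 0 != 0))

-- [i for i, b in enumerate(a) if b]
def pvSupport (a : List Int) : List Int :=
  ((PySem.List.enumerate a 0).filter (fun p => p.2 != 0)).map (fun p => p.1)

-- merge_xor(p, q): two-pointer merge producing the symmetric difference of two
-- strictly increasing lists (ported as the structural recursion of the while loop)
def pvMergeXor : List Int → List Int → List Int
  | [], q => q
  | p, [] => p
  | x :: p, y :: q =>
    if x < y then x :: pvMergeXor p (y :: q)
    else if y < x then y :: pvMergeXor (x :: p) q
    else pvMergeXor p q
termination_by p q => p.length + q.length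

-- {yi: frozenset(i for i in sx if i not in sy) for yi, sy in enumerate(zero_sup)}
def pvMonoRowB (sx : List Int) (zsup : List (List Int)) : PySem.Dict Int (List Int) :=
  (PySem.List.enumerate zsup 0).foldl
    (fun row yp => row.insert yp.1 (PySem.Set.ofList (sx.filter (fun i => ! yp.2.contains i))))
    PySem.Dict.empty

def pvKwMonoB (osup zsup : List (List Int)) : PySem.Dict Int (List (Int × List Int)) :=
  (PySem.List.enumerate osup 0).foldl
    (fun d xp => d.insert xp.1 (pvMonoRowB xp.2 zsup).items) PySem.Dict.empty

-- {yi: frozenset(merge_xor(sx, sy)) for yi, sy in enumerate(zero_sup)}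
def pvGenRowB (sx : List Int) (zsup : List (List Int)) : PySem.Dict Int (List Int) :=
  (PySem.List.enumerate zsup 0).foldl
    (fun row yp => row.insert yp.1 (PySem.Set.ofList (pvMergeXor sx yp.2)))
    PySem.Dict.empty

def pvKwGenB (osup zsup : List (List Int)) : PySem.Dict Int (List (Int × List Int)) :=
  (PySem.List.enumerate osup 0).foldl
    (fun d xp => d.insert xp.1 (pvGenRowB xp.2 zsup).items) PySem.Dict.empty

def compute_kw_matrix_alt (n : Int) (clauses : List (List Int)) :
    List (List Int) × List (List Int) × (List (Int × List (Int × List Int))) × (List (Int × List (Int × List Int))) :=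
  let assignments := pvAssignments n
  let ones := assignments.filter (fun a => pvSatB clauses a)
  let zeros := assignments.filter (fun a => ! pvSatB clauses a)
  let osup := ones.map pvSupport
  let zsup := zeros.map pvSupport
  (ones, zeros, (pvKwMonoB osup zsup).items, (pvKwGenB osup zsup).items)

-- ===== PRECONDITION & SPEC =====

-- Pre_ excludes the inputs on which Python A raises: n < 0 (range(2**n) is a TypeError) and clause
-- variables outside [-n, n) (assignment[v] is an IndexError); it also excludes the few inputs with an
-- out-of-range variable that A's clause/any() short-circuiting happens never to index (A then returns,
-- and B returns the same value there, short-circuiting in the same places).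
def Pre_compute_kw_matrix (n : Int) (clauses : List (List Int)) : Prop :=
  0 ≤ n ∧ ∀ c ∈ clauses, ∀ v ∈ c, -n ≤ v ∧ v < n
instance (n : Int) (clauses : List (List Int)) : Decidable (Pre_compute_kw_matrix n clauses) := by
  unfold Pre_compute_kw_matrix; infer_instance

def pvWitness_compute_kw_matrix : Int × List (List Int) := (2, [[0, 1], [1]])

def Spec_compute_kw_matrix (n : Int) (clauses : List (List Int))
    (out : List (List Int) × List (List Int) × (List (Int × List (Int × List Int))) × (List (Int × List (Int × List Int)))) : Prop :=
  out = compute_kw_matrix_alt n clauses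
instance (n : Int) (clauses : List (List Int))
    (out : List (List Int) × List (List Int) × (List (Int × List (Int × List Int))) × (List (Int × List (Int × List Int)))) :
    Decidable (Spec_compute_kw_matrix n clauses out) := by
  unfold Spec_compute_kw_matrix
  letI h : DecidableEq (List (Int × List (Int × List Int))) := inferInstance
  infer_instance

-- ===== CLAIM (what is proved, stated in full; the proofs are below) =====
def Claim_equal_compute_kw_matrix : Prop := ∀ (n : Int) (clauses : List (List Int)), Dom_compute_kw_matrix n clauses → Pre_compute_kw_matrix n clauses → Spec_compute_kw_matrix n clauses (compute_kw_matrix n clauses)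

-- ===== LEMMAS AND PROOFS =====

-- bit k of a nonnegative mask, as Python's (m >> k) & 1
theorem pvBandBit (m k : Nat) :
    PySem.Int.band ((m : Int) >>> (k : Int)) 1 = if m.testBit k then 1 else 0 := by
  rw [show ((m : Int) >>> (k : Int)) = ((m >>> k : Nat) : Int) from Int.shiftRight_natCast m k,
    show (1:Int) = ((1:Nat):Int) from rfl, PySem.Int.band_natCast]
  have h2 := Nat.and_one_is_mod (m >>> k)
  have ht : m.testBit k = ((m >>> k) &&& 1 == 1) := by simp [Nat.testBit]
  rw [ht]
  have hlt : (m >>> k) &&& 1 = 0 ∨ (m >>> k) &&& 1 = 1 := by omega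
  rcases hlt with h | h <;> simp [h]

-- assignment element k is bit k of the mask
theorem pvAsg_get (n : Int) (bm k : Nat) (hk : (k : Int) < n) :
    PySem.List.pyGetD (pvAsg n (bm : Int)) (k : Int) 0 = if bm.testBit k then 1 else 0 := by
  unfold pvAsg
  rw [PySem.List.pyGetD_map_pyRange_of_nonneg _ n (k : Int) 0 (by positivity) hk]
  exact pvBandBit bm k

theorem pvAsg_length (n : Int) (b : Int) : (pvAsg n b).length = n.toNat := by
  unfold pvAsg; simp [PySem.List.length_pyRange_one]

-- the bit list of a mask, low bit first
def asgLE (k m : Nat) : List Int :=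
  (List.range k).map (fun i => if m.testBit i then (1:Int) else 0)

theorem pvAsg_natCast (n : Int) (m : Nat) :
    pvAsg n (m : Int) = asgLE n.toNat m := by
  unfold pvAsg asgLE
  rw [PySem.List.pyRange_one]
  simp only [sub_zero, List.map_map]
  apply List.map_congr_left
  intro i _
  simp only [Function.comp_def, zero_add]
  exact pvBandBit m i

-- a fold that ignores the list elements is an iterate
theorem pvFoldConst {α β : Type} (f : α → α) (l : List β) (i : α) :
    l.foldl (fun a _ => f a) i = f^[l.length] i := by
  induction l generalizing i with
  | nil => rfl
  | cons x xs ih => simpa [Function.iterate_succ_apply] using ih (f i)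

-- B's recursive growth enumerates exactly the bit lists of 0 .. 2^k - 1
theorem pvGrowIter (k : Nat) :
    pvGrow^[k] [[]] = (List.range (2 ^ k)).map (asgLE k) := by
  induction k with
  | zero => simp [asgLE]
  | succ k ih =>
    rw [Function.iterate_succ_apply', ih]
    have h1 : ∀ m ∈ List.range (2 ^ k), asgLE k m ++ [(0:Int)] = asgLE (k+1) m := by
      intro m hm
      rw [asgLE, asgLE, List.range_succ, List.map_append]
      simp [Nat.testBit_lt_two_pow (List.mem_range.mp hm)]
    have h2 : ∀ m ∈ List.range (2 ^ k), asgLE k m ++ [(1:Int)] = asgLE (k+1) (2 ^ k + m) := by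
      intro m hm
      rw [asgLE, asgLE, List.range_succ, List.map_append]
      have hb : (2 ^ k + m).testBit k = true := by
        rw [Nat.testBit_two_pow_add_eq]
        simp [Nat.testBit_lt_two_pow (List.mem_range.mp hm)]
      simp only [List.map_cons, List.map_nil, hb, if_true]
      congr 1
      apply List.map_congr_left
      intro i hi
      rw [Nat.testBit_two_pow_add_gt (List.mem_range.mp hi)]
    rw [pvGrow, List.map_map, List.map_map,
      show 2 ^ (k+1) = 2 ^ k + 2 ^ k by ring, List.range_add, List.map_append, List.map_map]
    congr 1
    · exact List.map_congr_left (fun m hm => h1 m hm)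
    · exact List.map_congr_left (fun m hm => by
        simpa using h2 m hm)

-- B's assignment list is A's enumeration
theorem pvAssignments_eq (n : Int) :
    pvAssignments n = (PySem.List.pyRange 0 ((2:Int) ^ n.toNat) 1).map (pvAsg n) := by
  unfold pvAssignments
  rw [pvFoldConst, PySem.List.length_pyRange_one]
  simp only [sub_zero]
  rw [pvGrowIter, PySem.List.pyRange_one]
  have hcast : (((2:Int) ^ n.toNat - 0)).toNat = 2 ^ n.toNat := by
    rw [sub_zero, show ((2:Int) ^ n.toNat) = ((2 ^ n.toNat : Nat) : Int) by push_cast; ring,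
      Int.toNat_natCast]
  rw [hcast, List.map_map]
  apply List.map_congr_left
  intro m _
  simp only [Function.comp_def, zero_add]
  exact (pvAsg_natCast n m).symm

-- the two satisfiability tests are the same predicate
theorem pvAnyEq (a : List Int) (c : List Int) :
    pvAnyA a c = c.any (fun v => PySem.List.pyGetD a v 0 != 0) := by
  induction c with
  | nil => rfl
  | cons v vs ih =>
    rw [pvAnyA, List.any_cons, ih]
    by_cases h : PySem.List.pyGetD a v 0 = 0 <;> simp [h]

theorem pvSatEq (a : List Int) (clauses : List (List Int)) :
    evaluate_mono3sat a clauses = pvSatB clauses a := by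
  induction clauses with
  | nil => rfl
  | cons c cs ih =>
    rw [evaluate_mono3sat, pvSatB, List.all_cons, ← pvAnyEq a c,
      show cs.all (fun c => c.any fun v => PySem.List.pyGetD a v 0 != 0) = pvSatB cs a from rfl,
      ← ih]
    by_cases h : pvAnyA a c <;> simp [h]

-- A's enumeration loop is append-filtering
theorem pvFoldA (n : Int) (clauses : List (List Int)) (l : List Int)
    (o z : List (List Int)) :
    l.foldl (pvStepA n clauses) (o, z)
      = (o ++ ((l.filter (fun b => evaluate_mono3sat (pvAsg n b) clauses)).map (pvAsg n)),
         z ++ ((l.filter (fun b => ! evaluate_mono3sat (pvAsg n b) clauses)).map (pvAsg n))) := by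
  induction l generalizing o z with
  | nil => simp
  | cons b l ih =>
    rw [List.foldl_cons]
    by_cases hb : evaluate_mono3sat (pvAsg n b) clauses
    · rw [show pvStepA n clauses (o, z) b = (o ++ [pvAsg n b], z) by simp [pvStepA, hb], ih]
      simp [hb]
    · rw [show pvStepA n clauses (o, z) b = (o, z ++ [pvAsg n b]) by simp [pvStepA, hb], ih]
      simp [hb]

-- a fold whose step acts componentwise is a pair of folds
theorem pvFoldPair {α β γ : Type} (l : List γ) (f : α × β → γ → α × β)
    (g : α → γ → α) (h : β → γ → β)
    (hf : ∀ p y, f p y = (g p.1 y, h p.2 y)) (a : α) (b : β) :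
    l.foldl f (a, b) = (l.foldl g a, l.foldl h b) := by
  induction l generalizing a b with
  | nil => rfl
  | cons x xs ih =>
    rw [List.foldl_cons, List.foldl_cons, List.foldl_cons, hf]
    exact ih _ _

theorem pvEnumMap {α β : Type} (g : α → β) (l : List α) (s : Int) :
    PySem.List.enumerate (l.map g) s = (PySem.List.enumerate l s).map (fun p => (p.1, g p.2)) := by
  induction l generalizing s with
  | nil => simp [PySem.List.enumerate_nil]
  | cons x xs ih => simp [PySem.List.enumerate_cons, ih]

-- support is the sorted index filter
theorem pvSupport_eq (x : List Int) :
    pvSupport x = (PySem.List.pyRange 0 (x.length : Int) 1).filter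
      (fun j => PySem.List.pyGetD x j 0 != 0) := by
  unfold pvSupport
  rw [PySem.List.enumerate_eq_map_pyRange (d := 0), List.filter_map, List.map_map]
  simp [Function.comp_def]

theorem pvSupport_pairwise (x : List Int) : (pvSupport x).Pairwise (· < ·) := by
  rw [pvSupport_eq]
  exact (PySem.List.pairwise_lt_pyRange_one 0 (x.length : Int)).filter _

theorem pvSupport_mem (x : List Int) (i : Int) :
    i ∈ pvSupport x ↔ (0 ≤ i ∧ i < (x.length : Int)) ∧ PySem.List.pyGetD x i 0 ≠ 0 := by
  rw [pvSupport_eq, List.mem_filter, PySem.List.mem_pyRange_one]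
  simp

-- membership in the support of an assignment, in terms of the mask's bits
theorem pvSupport_asg_mem (n : Int) (m : Nat) (a : Int) :
    a ∈ pvSupport (pvAsg n (m : Int)) ↔ 0 ≤ a ∧ a < n ∧ m.testBit a.toNat = true := by
  rw [pvSupport_mem, pvAsg_length]
  constructor
  · rintro ⟨⟨h0, h1⟩, hx⟩
    have hn' : 0 < n := by omega
    have hk : ((a.toNat : Nat) : Int) = a := by omega
    rw [← hk, pvAsg_get n m a.toNat (by omega)] at hx
    refine ⟨h0, by omega, ?_⟩
    by_cases hb : m.testBit a.toNat = true
    · exact hb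
    · rw [Bool.not_eq_true] at hb
      rw [hb] at hx
      simp at hx
  · rintro ⟨h0, h1, hb⟩
    have hk : ((a.toNat : Nat) : Int) = a := by omega
    refine ⟨⟨h0, by omega⟩, ?_⟩
    rw [← hk, pvAsg_get n m a.toNat (by omega), hb]
    simp

-- two strictly increasing lists with the same members are equal
theorem pvSortedExt : ∀ (l1 l2 : List Int), l1.Pairwise (· < ·) → l2.Pairwise (· < ·) →
    (∀ a, a ∈ l1 ↔ a ∈ l2) → l1 = l2 := by
  intro l1
  induction l1 with
  | nil =>
    intro l2 _ _ h
    cases l2 with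
    | nil => rfl
    | cons b l2 => exact absurd ((h b).mpr (by simp)) (by simp)
  | cons a l1 ih =>
    intro l2 h1 h2 h
    cases l2 with
    | nil => exact absurd ((h a).mp (by simp)) (by simp)
    | cons b l2 =>
      have hab : a = b := by
        have ha : a ∈ b :: l2 := (h a).mp (by simp)
        have hb : b ∈ a :: l1 := (h b).mpr (by simp)
        rcases List.mem_cons.mp ha with h' | h'
        · exact h'
        · have hba : b < a := (List.pairwise_cons.mp h2).1 a h'
          rcases List.mem_cons.mp hb with h'' | h''
          · omega
          · have := (List.pairwise_cons.mp h1).1 b h''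
            omega
      subst hab
      congr 1
      apply ih l2 (List.pairwise_cons.mp h1).2 (List.pairwise_cons.mp h2).2
      intro c
      constructor
      · intro hc
        have hac : a < c := (List.pairwise_cons.mp h1).1 c hc
        rcases List.mem_cons.mp ((h c).mp (by simp [hc])) with h' | h'
        · omega
        · exact h'
      · intro hc
        have hac : a < c := (List.pairwise_cons.mp h2).1 c hc
        rcases List.mem_cons.mp ((h c).mpr (by simp [hc])) with h' | h'
        · omega
        · exact h'

-- the merge of two strictly increasing lists is their sorted symmetric difference
theorem pvMergeXor_spec : ∀ (p q : List Int), p.Pairwise (· < ·) → q.Pairwise (· < ·) →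
    (pvMergeXor p q).Pairwise (· < ·) ∧
      (∀ a, a ∈ pvMergeXor p q ↔ (a ∈ p ∧ a ∉ q) ∨ (a ∈ q ∧ a ∉ p)) := by
  intro p q hp hq
  induction p, q using pvMergeXor.induct with
  | case1 q =>
    rw [pvMergeXor]
    exact ⟨hq, by simp⟩
  | case2 p hne =>
    rw [pvMergeXor]
    · exact ⟨hp, by simp⟩
    · exact hne
  | case3 x p y q hxy ih =>
    obtain ⟨hx, hp'⟩ := List.pairwise_cons.mp hp
    obtain ⟨hy, hq'⟩ := List.pairwise_cons.mp hq
    obtain ⟨ihp, ihm⟩ := ih hp' hq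
    rw [pvMergeXor, if_pos hxy]
    constructor
    · rw [List.pairwise_cons]
      refine ⟨?_, ihp⟩
      intro b hb
      rcases (ihm b).mp hb with ⟨hbp, _⟩ | ⟨hbq, _⟩
      · exact hx b hbp
      · rcases List.mem_cons.mp hbq with h' | h'
        · omega
        · have := hy b h'; omega
    · intro a
      have hxq : x ∉ y :: q := by
        intro hmem
        rcases List.mem_cons.mp hmem with h' | h'
        · omega
        · have := hy x h'; omega
      rw [List.mem_cons, ihm a]
      constructor
      · rintro (rfl | hcase)
        · exact Or.inl ⟨by simp, hxq⟩
        · rcases hcase with ⟨hap, hanq⟩ | ⟨haq, hanp⟩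
          · exact Or.inl ⟨by simp [hap], hanq⟩
          · refine Or.inr ⟨haq, ?_⟩
            intro hmem
            rcases List.mem_cons.mp hmem with h' | h'
            · subst h'; exact absurd haq hxq
            · exact hanp h'
      · rintro (⟨hap, hanq⟩ | ⟨haq, hanp⟩)
        · rcases List.mem_cons.mp hap with h' | h'
          · exact Or.inl h'
          · exact Or.inr (Or.inl ⟨h', hanq⟩)
        · refine Or.inr (Or.inr ⟨haq, ?_⟩)
          intro h'
          exact hanp (by simp [h'])
  | case4 x p y q hxy hyx ih =>
    obtain ⟨hx, hp'⟩ := List.pairwise_cons.mp hp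
    obtain ⟨hy, hq'⟩ := List.pairwise_cons.mp hq
    obtain ⟨ihp, ihm⟩ := ih hp hq'
    rw [pvMergeXor, if_neg hxy, if_pos hyx]
    constructor
    · rw [List.pairwise_cons]
      refine ⟨?_, ihp⟩
      intro b hb
      rcases (ihm b).mp hb with ⟨hbp, _⟩ | ⟨hbq, _⟩
      · rcases List.mem_cons.mp hbp with h' | h'
        · omega
        · have := hx b h'; omega
      · exact hy b hbq
    · intro a
      have hyp : y ∉ x :: p := by
        intro hmem
        rcases List.mem_cons.mp hmem with h' | h'
        · omega
        · have := hx y h'; omega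
      rw [List.mem_cons, ihm a]
      constructor
      · rintro (rfl | hcase)
        · exact Or.inr ⟨by simp, hyp⟩
        · rcases hcase with ⟨hap, hanq⟩ | ⟨haq, hanp⟩
          · refine Or.inl ⟨hap, ?_⟩
            intro hmem
            rcases List.mem_cons.mp hmem with h' | h'
            · subst h'; exact absurd hap hyp
            · exact hanq h'
          · exact Or.inr ⟨by simp [haq], hanp⟩
      · rintro (⟨hap, hanq⟩ | ⟨haq, hanp⟩)
        · refine Or.inr (Or.inl ⟨hap, ?_⟩)
          intro h'
          exact hanq (by simp [h'])
        · rcases List.mem_cons.mp haq with h' | h'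
          · exact Or.inl h'
          · exact Or.inr (Or.inr ⟨h', hanp⟩)
  | case5 x p y q hxy hyx ih =>
    have hxeq : x = y := by omega
    subst hxeq
    obtain ⟨hx, hp'⟩ := List.pairwise_cons.mp hp
    obtain ⟨hy, hq'⟩ := List.pairwise_cons.mp hq
    obtain ⟨ihp, ihm⟩ := ih hp' hq'
    rw [pvMergeXor, if_neg hxy, if_neg hyx]
    refine ⟨ihp, ?_⟩
    intro a
    rw [ihm a]
    constructor
    · rintro (⟨hap, hanq⟩ | ⟨haq, hanp⟩)
      · have hax : x < a := hx a hap
        exact Or.inl ⟨by simp [hap], by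
          intro hmem
          rcases List.mem_cons.mp hmem with h' | h'
          · omega
          · exact hanq h'⟩
      · have hax : x < a := hy a haq
        exact Or.inr ⟨by simp [haq], by
          intro hmem
          rcases List.mem_cons.mp hmem with h' | h'
          · omega
          · exact hanp h'⟩
    · rintro (⟨hap, hanq⟩ | ⟨haq, hanp⟩)
      · rcases List.mem_cons.mp hap with h' | h'
        · subst h'; exact absurd (List.mem_cons_self) hanq
        · exact Or.inl ⟨h', fun h'' => hanq (by simp [h''])⟩
      · rcases List.mem_cons.mp haq with h' | h'
        · subst h'; exact absurd (List.mem_cons_self) hanp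
        · exact Or.inr ⟨h', fun h'' => hanp (by simp [h''])⟩

-- per-pair value lemmas: B's support algebra equals A's range scans
theorem pvMonoPair (n : Int) (xm ym : Nat) :
    PySem.Set.ofList ((pvSupport (pvAsg n (xm : Int))).filter
        (fun i => ! (pvSupport (pvAsg n (ym : Int))).contains i))
      = pvMono n (pvAsg n (xm : Int)) (pvAsg n (ym : Int)) := by
  unfold pvMono
  congr 1
  apply pvSortedExt
  · exact (pvSupport_pairwise _).filter _
  · exact (PySem.List.pairwise_lt_pyRange_one 0 n).filter _
  intro a
  rw [List.mem_filter, List.mem_filter, PySem.List.mem_pyRange_one, pvSupport_asg_mem n xm a]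
  constructor
  · rintro ⟨⟨h0, h1, hxb⟩, hcon⟩
    have hny : a ∉ pvSupport (pvAsg n (ym : Int)) := by simpa using hcon
    rw [pvSupport_asg_mem n ym a] at hny
    have hyb : ym.testBit a.toNat = false := by
      by_cases hb : ym.testBit a.toNat = true
      · exact absurd ⟨h0, h1, hb⟩ hny
      · simpa using hb
    refine ⟨⟨h0, h1⟩, ?_⟩
    have hk : ((a.toNat : Nat) : Int) = a := by omega
    rw [← hk, pvAsg_get n xm a.toNat (by omega), pvAsg_get n ym a.toNat (by omega), hxb, hyb]
    simp
  · rintro ⟨⟨h0, h1⟩, hpq⟩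
    have hk : ((a.toNat : Nat) : Int) = a := by omega
    rw [← hk, pvAsg_get n xm a.toNat (by omega), pvAsg_get n ym a.toNat (by omega)] at hpq
    by_cases hxb : xm.testBit a.toNat = true
    · by_cases hyb : ym.testBit a.toNat = true
      · rw [hxb, hyb] at hpq; simp at hpq
      · refine ⟨⟨h0, h1, hxb⟩, ?_⟩
        have hnm : a ∉ pvSupport (pvAsg n (ym : Int)) := by
          rw [pvSupport_asg_mem n ym a]
          rintro ⟨_, _, hb⟩
          exact hyb hb
        simpa using hnm
    · rw [Bool.not_eq_true] at hxb
      rw [hxb] at hpq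
      simp at hpq

theorem pvGenPair (n : Int) (xm ym : Nat) :
    PySem.Set.ofList (pvMergeXor (pvSupport (pvAsg n (xm : Int))) (pvSupport (pvAsg n (ym : Int))))
      = pvGen n (pvAsg n (xm : Int)) (pvAsg n (ym : Int)) := by
  unfold pvGen
  congr 1
  obtain ⟨hsort, hmem⟩ := pvMergeXor_spec _ _
    (pvSupport_pairwise (pvAsg n (xm : Int))) (pvSupport_pairwise (pvAsg n (ym : Int)))
  apply pvSortedExt _ _ hsort ((PySem.List.pairwise_lt_pyRange_one 0 n).filter _)
  intro a
  rw [hmem a, List.mem_filter, PySem.List.mem_pyRange_one,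
    pvSupport_asg_mem n xm a, pvSupport_asg_mem n ym a]
  constructor
  · rintro (⟨⟨h0, h1, hxb⟩, hny⟩ | ⟨⟨h0, h1, hyb⟩, hnx⟩)
    · have hyb : ym.testBit a.toNat = false := by
        by_cases hb : ym.testBit a.toNat = true
        · exact absurd ⟨h0, h1, hb⟩ hny
        · simpa using hb
      refine ⟨⟨h0, h1⟩, ?_⟩
      have hk : ((a.toNat : Nat) : Int) = a := by omega
      rw [← hk, pvAsg_get n xm a.toNat (by omega), pvAsg_get n ym a.toNat (by omega), hxb, hyb]
      simp
    · have hxb : xm.testBit a.toNat = false := by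
        by_cases hb : xm.testBit a.toNat = true
        · exact absurd ⟨h0, h1, hb⟩ hnx
        · simpa using hb
      refine ⟨⟨h0, h1⟩, ?_⟩
      have hk : ((a.toNat : Nat) : Int) = a := by omega
      rw [← hk, pvAsg_get n xm a.toNat (by omega), pvAsg_get n ym a.toNat (by omega), hxb, hyb]
      simp
  · rintro ⟨⟨h0, h1⟩, hne⟩
    have hk : ((a.toNat : Nat) : Int) = a := by omega
    rw [← hk, pvAsg_get n xm a.toNat (by omega), pvAsg_get n ym a.toNat (by omega)] at hne
    by_cases hxb : xm.testBit a.toNat = true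
    · by_cases hyb : ym.testBit a.toNat = true
      · rw [hxb, hyb] at hne; simp at hne
      · refine Or.inl ⟨⟨h0, h1, hxb⟩, ?_⟩
        rintro ⟨_, _, hb⟩
        exact hyb hb
    · by_cases hyb : ym.testBit a.toNat = true
      · refine Or.inr ⟨⟨h0, h1, hyb⟩, ?_⟩
        rintro ⟨_, _, hb⟩
        exact hxb hb
      · rw [Bool.not_eq_true] at hxb hyb
        rw [hxb, hyb] at hne
        simp at hne

theorem pvMemEnum {α : Type} (l : List α) (p : Int × α) (hp : p ∈ PySem.List.enumerate l 0) :
    p.2 ∈ l := by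
  obtain ⟨k, hk, rfl⟩ := (PySem.List.mem_enumerate_iff l 0 p).mp hp
  exact List.getElem_mem hk

-- A's interleaved outer loop is a pair of single-dict folds
theorem pvOuterSplit (n : Int) (ones zeros : List (List Int)) :
    (PySem.List.enumerate ones 0).foldl (pvOuterStepA n zeros) (PySem.Dict.empty, PySem.Dict.empty)
      = ((PySem.List.enumerate ones 0).foldl (fun d xp => d.insert xp.1
            (((PySem.List.enumerate zeros 0).foldl
              (fun r (yp : Int × List Int) => r.insert yp.1 (pvMono n xp.2 yp.2)) PySem.Dict.empty).items))
          PySem.Dict.empty,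
         (PySem.List.enumerate ones 0).foldl (fun d xp => d.insert xp.1
            (((PySem.List.enumerate zeros 0).foldl
              (fun r (yp : Int × List Int) => r.insert yp.1 (pvGen n xp.2 yp.2)) PySem.Dict.empty).items))
          PySem.Dict.empty) := by
  apply pvFoldPair
  intro kw xp
  dsimp only [pvOuterStepA]
  rw [pvFoldPair (PySem.List.enumerate zeros 0) (pvRowStepA n xp.2)
      (fun r yp => r.insert yp.1 (pvMono n xp.2 yp.2))
      (fun r yp => r.insert yp.1 (pvGen n xp.2 yp.2)) (fun p y => rfl)]

-- the KW part: A's fold over assignments equals B's folds over supports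
theorem pvKwEq (n : Int) (F G : List Int)
    (hF : ∀ b ∈ F, 0 ≤ b) (hG : ∀ b ∈ G, 0 ≤ b) :
    (PySem.List.enumerate (F.map (pvAsg n)) 0).foldl (pvOuterStepA n (G.map (pvAsg n)))
        (PySem.Dict.empty, PySem.Dict.empty)
      = (pvKwMonoB ((F.map (pvAsg n)).map pvSupport) ((G.map (pvAsg n)).map pvSupport),
         pvKwGenB ((F.map (pvAsg n)).map pvSupport) ((G.map (pvAsg n)).map pvSupport)) := by
  rw [pvOuterSplit]
  rw [Prod.mk.injEq]
  constructor
  · -- mono component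
    unfold pvKwMonoB pvMonoRowB
    simp only [pvEnumMap, List.foldl_map]
    apply PySem.List.foldl_congr_mem
    intro d xp hxp
    have hx0 : 0 ≤ xp.2 := hF xp.2 (pvMemEnum _ _ hxp)
    congr 1
    congr 1
    apply PySem.List.foldl_congr_mem
    intro r yp hyp
    have hy0 : 0 ≤ yp.2 := hG yp.2 (pvMemEnum _ _ hyp)
    congr 1
    rw [show xp.2 = ((xp.2.toNat : Nat) : Int) by omega,
      show yp.2 = ((yp.2.toNat : Nat) : Int) by omega]
    exact (pvMonoPair n xp.2.toNat yp.2.toNat).symm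
  · -- gen component
    unfold pvKwGenB pvGenRowB
    simp only [pvEnumMap, List.foldl_map]
    apply PySem.List.foldl_congr_mem
    intro d xp hxp
    have hx0 : 0 ≤ xp.2 := hF xp.2 (pvMemEnum _ _ hxp)
    congr 1
    congr 1
    apply PySem.List.foldl_congr_mem
    intro r yp hyp
    have hy0 : 0 ≤ yp.2 := hG yp.2 (pvMemEnum _ _ hyp)
    congr 1
    rw [show xp.2 = ((xp.2.toNat : Nat) : Int) by omega,
      show yp.2 = ((yp.2.toNat : Nat) : Int) by omega]
    exact (pvGenPair n xp.2.toNat yp.2.toNat).symm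

-- ===== VERDICT (by name: the statement is the Claim_ definition above) =====
theorem compute_kw_matrix_spec : Claim_equal_compute_kw_matrix := by
  intro n clauses _hdom hpre
  obtain ⟨hn, _hcl⟩ := hpre
  unfold Spec_compute_kw_matrix
  simp only [compute_kw_matrix, compute_kw_matrix_alt]
  rw [pvFoldA, pvAssignments_eq n]
  simp only [List.nil_append]
  have hones : ((PySem.List.pyRange 0 ((2:Int) ^ n.toNat) 1).map (pvAsg n)).filter
        (fun a => pvSatB clauses a)
      = ((PySem.List.pyRange 0 ((2:Int) ^ n.toNat) 1).filter
          (fun b => evaluate_mono3sat (pvAsg n b) clauses)).map (pvAsg n) := by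
    rw [List.filter_map]
    congr 1
    apply List.filter_congr
    intro b _
    simp [pvSatEq]
  have hzeros : ((PySem.List.pyRange 0 ((2:Int) ^ n.toNat) 1).map (pvAsg n)).filter
        (fun a => ! pvSatB clauses a)
      = ((PySem.List.pyRange 0 ((2:Int) ^ n.toNat) 1).filter
          (fun b => ! evaluate_mono3sat (pvAsg n b) clauses)).map (pvAsg n) := by
    rw [List.filter_map]
    congr 1
    apply List.filter_congr
    intro b _
    simp [pvSatEq]
  rw [hones, hzeros]
  have hF : ∀ b ∈ (PySem.List.pyRange 0 ((2:Int) ^ n.toNat) 1).filter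
      (fun b => evaluate_mono3sat (pvAsg n b) clauses), 0 ≤ b := by
    intro b hb
    exact (PySem.List.mem_pyRange_one.mp (List.mem_of_mem_filter hb)).1
  have hG : ∀ b ∈ (PySem.List.pyRange 0 ((2:Int) ^ n.toNat) 1).filter
      (fun b => ! evaluate_mono3sat (pvAsg n b) clauses), 0 ≤ b := by
    intro b hb
    exact (PySem.List.mem_pyRange_one.mp (List.mem_of_mem_filter hb)).1
  rw [pvKwEq n _ _ hF hG]
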